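-- pv_equiv track=rewrite | github.com/Donghunn-Lee/CodingTest | 백준/Silver/1476. 날짜 계산/날짜 계산.py | bfs
-- ===== SOURCE A (Python) =====
-- def bfs(e,s,m):
--     count = 1
--
--     while True:
--         if (e, s, m) == (1, 1, 1):
--             return count
--
--         if e == 0:
--             e = 15
--         if s == 0:
--             s = 28
--         if m == 0:
--             m = 19
--
--         e -= 1
--         s -= 1
--         m -= 1
--         count += 1
-- ===== SOURCE B (Python) =====
-- def bfs(e, s, m):
--     # CRT: solve c = e (mod 15), c = s (mod 28), c = m (mod 19) in closed form,
--     # then take the smallest such c that is >= max(1, e, s, m).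
--     x = (6916 * e + 4845 * s + 4200 * m) % 7980
--     L = max(1, e, s, m)
--     return L + (x - L) % 7980
-- ===== Notes on version B (the rewrite author's own statement) =====
-- stated objective: faster
-- what changed: Replaced A's step-by-step simulation of the three wrapping counters (up to max(e,s,m)+7980 iterations) by a closed-form Chinese-Remainder-Theorem solution of the three congruences plus a single shift to the smallest admissible index.
import Mathlib
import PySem

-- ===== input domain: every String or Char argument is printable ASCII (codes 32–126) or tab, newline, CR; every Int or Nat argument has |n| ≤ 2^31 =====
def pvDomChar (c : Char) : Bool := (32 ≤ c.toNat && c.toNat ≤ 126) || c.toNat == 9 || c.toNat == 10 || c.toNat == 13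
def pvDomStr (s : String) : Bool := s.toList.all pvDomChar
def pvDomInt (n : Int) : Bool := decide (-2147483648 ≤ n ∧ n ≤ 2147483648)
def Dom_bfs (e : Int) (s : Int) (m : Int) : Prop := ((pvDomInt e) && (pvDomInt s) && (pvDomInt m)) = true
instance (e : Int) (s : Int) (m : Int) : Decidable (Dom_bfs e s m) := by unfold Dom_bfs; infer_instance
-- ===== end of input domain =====

-- B replaces A's iteration of the three wrapping counters by a closed-form CRT solution (objective: faster).

-- ===== PORT A =====
-- The Python 'while True' loop, transliterated with a fuel argument that only makes it
-- total; on every input admitted by Pre_bfs the fuel is provably never exhausted.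
def bfsLoop : Nat → Int → Int → Int → Int → Int
  | 0, _, _, _, count => count
  | fuel + 1, e, s, m, count =>
    if e = 1 ∧ s = 1 ∧ m = 1 then count
    else
      bfsLoop fuel ((if e = 0 then 15 else e) - 1) ((if s = 0 then 28 else s) - 1)
        ((if m = 0 then 19 else m) - 1) (count + 1)

def bfs (e : Int) (s : Int) (m : Int) : Int :=
  bfsLoop (e.toNat + s.toNat + m.toNat + 8000) e s m 1

-- ===== PORT B =====
def bfs_alt (e : Int) (s : Int) (m : Int) : Int :=
  let x := (6916 * e + 4845 * s + 4200 * m) % 7980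
  let L := max 1 (max e (max s m))
  L + (x - L) % 7980

-- ===== PRECONDITION & SPEC =====
-- Pre_ excludes inputs with a negative component: there A's loop decrements forever and
-- never returns (the wrap-around at 0 is never reached from below), so A diverges.
def Pre_bfs (e : Int) (s : Int) (m : Int) : Prop := 0 ≤ e ∧ 0 ≤ s ∧ 0 ≤ m
instance (e : Int) (s : Int) (m : Int) : Decidable (Pre_bfs e s m) := by unfold Pre_bfs; infer_instance
def pvWitness_bfs : Int × Int × Int := (3, 14, 10)

def Spec_bfs (e : Int) (s : Int) (m : Int) (out : Int) : Prop := out = bfs_alt e s m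
instance (e : Int) (s : Int) (m : Int) (out : Int) : Decidable (Spec_bfs e s m out) := by unfold Spec_bfs; infer_instance

-- ===== CLAIM (what is proved, stated in full; the proofs are below) =====
def Claim_equal_bfs : Prop := ∀ (e : Int) (s : Int) (m : Int), Dom_bfs e s m → Pre_bfs e s m → Spec_bfs e s m (bfs e s m)

-- ===== LEMMAS AND PROOFS =====

-- value of a counter (cycle length n) after k decrement-with-wrap steps, start a ≥ 0
def pvVal (a : Int) (k : Nat) (n : Int) : Int :=
  if 1 ≤ a - k then a - k else (a - k) % n

lemma pvVal_zero (a n : Int) (ha : 0 ≤ a) : pvVal a 0 n = a := by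
  unfold pvVal
  split_ifs with h
  · simp
  · have : a = 0 := by push_cast at h ⊢; omega
    simp [this]

lemma pvVal_step15 (a : Int) (k : Nat) :
    (if pvVal a k 15 = 0 then 15 else pvVal a k 15) - 1 = pvVal a (k + 1) 15 := by
  unfold pvVal; push_cast; split_ifs <;> omega

lemma pvVal_step28 (a : Int) (k : Nat) :
    (if pvVal a k 28 = 0 then 28 else pvVal a k 28) - 1 = pvVal a (k + 1) 28 := by
  unfold pvVal; push_cast; split_ifs <;> omega

lemma pvVal_step19 (a : Int) (k : Nat) :
    (if pvVal a k 19 = 0 then 19 else pvVal a k 19) - 1 = pvVal a (k + 1) 19 := by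
  unfold pvVal; push_cast; split_ifs <;> omega

lemma pvVal_one15 (a : Int) (k : Nat) :
    pvVal a k 15 = 1 ↔ (a ≤ (k : Int) + 1 ∧ ((k : Int) + 1 - a) % 15 = 0) := by
  unfold pvVal; split_ifs <;> omega

lemma pvVal_one28 (a : Int) (k : Nat) :
    pvVal a k 28 = 1 ↔ (a ≤ (k : Int) + 1 ∧ ((k : Int) + 1 - a) % 28 = 0) := by
  unfold pvVal; split_ifs <;> omega

lemma pvVal_one19 (a : Int) (k : Nat) :
    pvVal a k 19 = 1 ↔ (a ≤ (k : Int) + 1 ∧ ((k : Int) + 1 - a) % 19 = 0) := by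
  unfold pvVal; split_ifs <;> omega

-- CRT: the three congruences are equivalent to one congruence mod 7980
lemma pv_crt (e s m c : Int) :
    ((c - e) % 15 = 0 ∧ (c - s) % 28 = 0 ∧ (c - m) % 19 = 0) ↔
      (c - (6916 * e + 4845 * s + 4200 * m) % 7980) % 7980 = 0 := by
  omega

lemma pv_loop (e0 s0 m0 : Int) :
    ∀ (fuel k : Nat), (k : Int) + 1 ≤ bfs_alt e0 s0 m0 →
      bfs_alt e0 s0 m0 ≤ (k : Int) + 1 + fuel →
      bfsLoop fuel (pvVal e0 k 15) (pvVal s0 k 28) (pvVal m0 k 19) ((k : Int) + 1) =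
        bfs_alt e0 s0 m0 := by
  set x := (6916 * e0 + 4845 * s0 + 4200 * m0) % 7980 with hx
  set L := max 1 (max e0 (max s0 m0)) with hL
  have hc : bfs_alt e0 s0 m0 = L + (x - L) % 7980 := rfl
  -- the target satisfies the congruence mod 7980 and the bounds
  have hcong : (bfs_alt e0 s0 m0 - x) % 7980 = 0 := by rw [hc]; omega
  have hge : L ≤ bfs_alt e0 s0 m0 := by rw [hc]; omega
  have hLb : 1 ≤ L ∧ e0 ≤ L ∧ s0 ≤ L ∧ m0 ≤ L := by
    refine ⟨le_max_left _ _, ?_, ?_, ?_⟩ <;> simp [hL]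
  intro fuel
  induction fuel with
  | zero =>
    intro k h1 h2
    have : (k : Int) + 1 = bfs_alt e0 s0 m0 := by push_cast at h2; omega
    simpa [bfsLoop] using this
  | succ f ih =>
    intro k h1 h2
    by_cases hstop : (k : Int) + 1 = bfs_alt e0 s0 m0
    · -- all three counters are 1: the congruences and bounds hold at the target
      have h3 : ((k : Int) + 1 - e0) % 15 = 0 ∧ ((k : Int) + 1 - s0) % 28 = 0 ∧
          ((k : Int) + 1 - m0) % 19 = 0 := by
        rw [pv_crt, hstop]; exact hcong
      have he1 : pvVal e0 k 15 = 1 := (pvVal_one15 e0 k).2 ⟨by omega, h3.1⟩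
      have hs1 : pvVal s0 k 28 = 1 := (pvVal_one28 s0 k).2 ⟨by omega, h3.2.1⟩
      have hm1 : pvVal m0 k 19 = 1 := (pvVal_one19 m0 k).2 ⟨by omega, h3.2.2⟩
      simp [bfsLoop, he1, hs1, hm1, hstop]
    · -- not yet at the target: the three counters are not all 1 (minimality), step once
      have hlt : (k : Int) + 1 < bfs_alt e0 s0 m0 := lt_of_le_of_ne h1 hstop
      have hnot : ¬ (pvVal e0 k 15 = 1 ∧ pvVal s0 k 28 = 1 ∧ pvVal m0 k 19 = 1) := by
        rintro ⟨a1, a2, a3⟩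
        rw [pvVal_one15] at a1; rw [pvVal_one28] at a2; rw [pvVal_one19] at a3
        have hcg : ((k : Int) + 1 - x) % 7980 = 0 :=
          (pv_crt e0 s0 m0 ((k : Int) + 1)).1 ⟨a1.2, a2.2, a3.2⟩
        -- k+1 satisfies congruence and k+1 ≥ L, so k+1 ≥ the target: contradiction
        have : L ≤ (k : Int) + 1 := by omega
        rw [hc] at hlt; omega
      have := ih (k + 1) (by push_cast; omega) (by push_cast; push_cast at h2; omega)
      rw [← pvVal_step15, ← pvVal_step28, ← pvVal_step19] at this
      simp only [bfsLoop, hnot, if_false]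
      push_cast at this ⊢
      convert this using 2

-- ===== VERDICT (by name: the statement is the Claim_ definition above) =====
theorem bfs_spec : Claim_equal_bfs := by
  intro e s m _hd hpre
  obtain ⟨he, hs, hm⟩ := hpre
  unfold Spec_bfs bfs
  have hv15 := pvVal_zero e 15 he
  have hv28 := pvVal_zero s 28 hs
  have hv19 := pvVal_zero m 19 hm
  have hL : bfs_alt e s m = max 1 (max e (max s m)) +
      ((6916 * e + 4845 * s + 4200 * m) % 7980 - max 1 (max e (max s m))) % 7980 := rfl
  have h1 : (0 : Int) + 1 ≤ bfs_alt e s m := by rw [hL]; omega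
  have h2 : bfs_alt e s m ≤ (0 : Int) + 1 + (e.toNat + s.toNat + m.toNat + 8000 : Nat) := by
    rw [hL]; push_cast; omega
  have := pv_loop e s m (e.toNat + s.toNat + m.toNat + 8000) 0 h1 h2
  rw [hv15, hv28, hv19] at this
  simpa using this
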